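-- pv_equiv track=rewrite | github.com/venkata-adulla/codebase-analysis-agent | backend/services/graph_service.py | _compute_cycle_count
-- ===== SOURCE A (Python) =====
-- from collections import Counter, defaultdict, deque
-- from typing import List, Dict, Any, Optional, Set, Tuple
--
-- def _compute_cycle_count(edges: List[Dict[str, Any]]) -> int:
--     adjacency: Dict[str, Set[str]] = defaultdict(set)
--     for edge in edges:
--         source = edge.get("source")
--         target = edge.get("target")
--         if source and target and source != target:
--             adjacency[source].add(target)
--
--     cycles: Set[Tuple[str, ...]] = set()
--
--     def dfs(node: str, start: str, path: List[str]):
--         for neighbor in adjacency.get(node, set()):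
--             if neighbor == start and len(path) > 1:
--                 cycle = tuple(sorted(path))
--                 cycles.add(cycle)
--                 continue
--             if neighbor in path or len(path) >= 6:
--                 continue
--             dfs(neighbor, start, [*path, neighbor])
--
--     for start in adjacency:
--         dfs(start, start, [start])
--
--     return len(cycles)
-- ===== SOURCE B (Python) =====
-- from collections import defaultdict
--
--
-- def _compute_cycle_count(edges):
--     adjacency = defaultdict(set)
--     for edge in edges:
--         source = edge.get("source")
--         target = edge.get("target")
--         if source and target and source != target:
--             adjacency[source].add(target)
--
--     # Breadth-first enumeration by path length: level k holds every simple
--     # path of k+1 nodes; closures are collected as canonical sorted tuples.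
--     level = [[s] for s in adjacency]
--     cycles = set()
--     for _ in range(6):
--         nxt = []
--         for p in level:
--             for nb in adjacency.get(p[-1], ()):
--                 if nb == p[0]:
--                     if len(p) > 1:
--                         cycles.add(tuple(sorted(p)))
--                 elif nb not in p and len(p) < 6:
--                     nxt.append(p + [nb])
--         level = nxt
--     return len(cycles)
-- ===== Notes on version B (the rewrite author's own statement) =====
-- stated objective: alternative
-- what changed: Replaces the per-start recursive DFS over paths with a single breadth-first enumeration by path length: one worklist of all simple paths of each length (1..6) from every start, extended level by level, collecting canonical sorted tuples of closing paths into the same set.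
import Mathlib
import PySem

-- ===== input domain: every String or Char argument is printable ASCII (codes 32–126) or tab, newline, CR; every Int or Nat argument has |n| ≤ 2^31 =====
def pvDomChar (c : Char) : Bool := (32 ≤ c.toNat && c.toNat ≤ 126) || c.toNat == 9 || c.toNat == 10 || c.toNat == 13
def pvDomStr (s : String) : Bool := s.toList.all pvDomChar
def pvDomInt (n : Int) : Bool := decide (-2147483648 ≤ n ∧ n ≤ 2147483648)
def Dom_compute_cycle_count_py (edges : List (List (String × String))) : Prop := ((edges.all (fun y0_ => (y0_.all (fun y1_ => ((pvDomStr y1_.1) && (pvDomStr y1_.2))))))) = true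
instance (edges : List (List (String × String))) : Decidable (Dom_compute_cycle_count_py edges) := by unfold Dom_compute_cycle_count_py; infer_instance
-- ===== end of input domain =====

-- B replaces A's per-start recursive DFS with a level-by-level breadth-first enumeration of
-- the same simple paths (objective: alternative decomposition, same asymptotic cost).

-- ===== PORT A =====
-- shared adjacency builder (the Python loop is textually identical in Source A and Source B)
def pvBuildAdj (edges : List (List (String × String))) : PySem.Dict String (PySem.Set String) :=
  edges.foldl (fun adj edge =>
    match (PySem.Dict.mk edge).get? "source", (PySem.Dict.mk edge).get? "target" with
    | some s, some t =>
        if s ≠ "" ∧ t ≠ "" ∧ s ≠ t then adj.modify s [] (fun st => PySem.Set.add st t) else adj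
    | _, _ => adj) PySem.Dict.empty

-- the recursive dfs of A; nbs is the remaining neighbour iterator of the current node
def pvDfsA (adj : PySem.Dict String (PySem.Set String)) (start : String)
    (path : List String) (nbs : List String) (cycles : PySem.Set (List String)) :
    PySem.Set (List String) :=
  match nbs with
  | [] => cycles
  | nb :: rest =>
    if nb = start ∧ 1 < path.length then
      pvDfsA adj start path rest (PySem.Set.add cycles (PySem.List.sorted path (fun x => x) false))
    else if nb ∈ path ∨ 6 ≤ path.length then
      pvDfsA adj start path rest cycles
    else
      pvDfsA adj start path rest (pvDfsA adj start (path ++ [nb]) (adj.getD nb []) cycles)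
termination_by (6 - path.length, nbs.length)
decreasing_by
  · exact Prod.Lex.right _ (Nat.lt_succ_self _)
  · exact Prod.Lex.right _ (Nat.lt_succ_self _)
  · apply Prod.Lex.left; simp; omega
  · exact Prod.Lex.right _ (Nat.lt_succ_self _)

def compute_cycle_count_py (edges : List (List (String × String))) : Int :=
  let adj := pvBuildAdj edges
  let cycles : PySem.Set (List String) :=
    adj.keys.foldl (fun cyc s => pvDfsA adj s [s] (adj.getD s []) cyc) PySem.Set.empty
  PySem.Set.len cycles

-- ===== PORT B =====
-- one pass of B's `for _ in range(6)` body: extend every path of the current level by one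
-- node, collecting the closing paths' canonical tuples
def pvBfsStep (adj : PySem.Dict String (PySem.Set String))
    (st : List (List String) × PySem.Set (List String)) :
    List (List String) × PySem.Set (List String) :=
  st.1.foldl (fun acc p =>
    (adj.getD (PySem.List.pyGetD p (-1) "") []).foldl (fun acc2 nb =>
      if nb = PySem.List.pyGetD p 0 "" then
        if 1 < p.length then
          (acc2.1, PySem.Set.add acc2.2 (PySem.List.sorted p (fun x => x) false))
        else acc2
      else if nb ∉ p ∧ p.length < 6 then (acc2.1 ++ [p ++ [nb]], acc2.2)
      else acc2) acc) ([], st.2)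

def compute_cycle_count_py_alt (edges : List (List (String × String))) : Int :=
  let adj := pvBuildAdj edges
  let fin := (PySem.List.pyRange 0 6 1).foldl (fun st _ => pvBfsStep adj st)
      (adj.keys.map (fun s => [s]), (PySem.Set.empty : PySem.Set (List String)))
  PySem.Set.len fin.2

-- ===== PRECONDITION & SPEC =====
def Spec_compute_cycle_count_py (edges : List (List (String × String))) (out : Int) : Prop := out = compute_cycle_count_py_alt edges
instance (edges : List (List (String × String))) (out : Int) : Decidable (Spec_compute_cycle_count_py edges out) := by unfold Spec_compute_cycle_count_py; infer_instance

-- ===== CLAIM (what is proved, stated in full; the proofs are below) =====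
def Claim_equal_compute_cycle_count_py : Prop := ∀ (edges : List (List (String × String))), Dom_compute_cycle_count_py edges → Spec_compute_cycle_count_py edges (compute_cycle_count_py edges)

-- ===== LEMMAS AND PROOFS =====

-- spec-side vocabulary
def pvLastS (p : List String) : String := p.getLast?.getD ""
def pvHeadS (p : List String) : String := p.headD ""
def pvCanon (p : List String) : List String := PySem.List.sorted p (fun x => x) false

-- ExtN adj n p q: q is reached from simple path p by n valid extension steps
inductive pvExtN (adj : PySem.Dict String (PySem.Set String)) : Nat → List String → List String → Prop
  | refl (p : List String) : pvExtN adj 0 p p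
  | step {n : Nat} {p q : List String} {nb : String} :
      nb ∈ adj.getD (pvLastS p) [] → nb ∉ p → p.length < 6 →
      pvExtN adj n (p ++ [nb]) q → pvExtN adj (n + 1) p q

-- cycles reachable by continuing from path p (start fixed)
def pvAFull (adj : PySem.Dict String (PySem.Set String)) (start : String)
    (p : List String) (t : List String) : Prop :=
  ∃ n q, pvExtN adj n p q ∧ 1 < q.length ∧ start ∈ adj.getD (pvLastS q) [] ∧ t = pvCanon q

-- cycles reachable when the pending neighbour iterator of p is nbs
def pvAFrom (adj : PySem.Dict String (PySem.Set String)) (start : String)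
    (p : List String) (nbs : List String) (t : List String) : Prop :=
  (1 < p.length ∧ start ∈ nbs ∧ t = pvCanon p) ∨
  ∃ nb ∈ nbs, nb ∉ p ∧ p.length < 6 ∧ pvAFull adj start (p ++ [nb]) t

theorem pvExtN_len {adj n p q} (h : pvExtN adj n p q) : q.length = p.length + n := by
  induction h with
  | refl => simp
  | step _ _ _ _ ih => simp at ih; omega

theorem pvExtN_mem {adj n p q} (h : pvExtN adj n p q) : ∀ x ∈ p, x ∈ q := by
  induction h with
  | refl => exact fun x hx => hx
  | step _ _ _ _ ih => exact fun x hx => ih x (by simp [hx])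

theorem pvExtN_head {adj n p q} (hp : p ≠ []) (h : pvExtN adj n p q) :
    pvHeadS q = pvHeadS p := by
  induction h with
  | refl => rfl
  | @step _ p' _ nb _ _ _ _ ih =>
    rw [ih (by simp)]
    cases p' with
    | nil => exact absurd rfl hp
    | cons a l => simp [pvHeadS]

theorem pvExtN_zero {adj : PySem.Dict String (PySem.Set String)} {p q : List String}
    (h : pvExtN adj 0 p q) : q = p := by cases h; rfl

theorem pvExtN_le6 {adj n p q} (h : pvExtN adj n p q) : n = 0 ∨ q.length ≤ 6 := by
  induction h with
  | refl => exact Or.inl rfl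
  | @step n p' q' nb hnb hmem hlen hrest ih =>
    refine Or.inr ?_
    rcases ih with h0 | h6
    · subst h0; rw [pvExtN_zero hrest]; simp; omega
    · exact h6

theorem pvAFull_unfold {adj start p t} :
    pvAFull adj start p t ↔
      (1 < p.length ∧ start ∈ adj.getD (pvLastS p) [] ∧ t = pvCanon p) ∨
      ∃ nb ∈ adj.getD (pvLastS p) [], nb ∉ p ∧ p.length < 6 ∧ pvAFull adj start (p ++ [nb]) t := by
  constructor
  · rintro ⟨n, q, hext, hq⟩
    cases hext with
    | refl => exact Or.inl hq
    | step hnb hmem hlen hrest => exact Or.inr ⟨_, hnb, hmem, hlen, _, _, hrest, hq⟩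
  · rintro (⟨h1, h2, h3⟩ | ⟨nb, hnb, hmem, hlen, n, q, hext, hq⟩)
    · exact ⟨0, p, pvExtN.refl p, h1, h2, h3⟩
    · exact ⟨n + 1, q, pvExtN.step hnb hmem hlen hext, hq⟩

-- characterization of pvDfsA
theorem pvDfsA_mem (adj : PySem.Dict String (PySem.Set String)) (start : String)
    (path : List String) (nbs : List String) (cyc : PySem.Set (List String))
    (hs : start ∈ path) (t : List String) :
    t ∈ pvDfsA adj start path nbs cyc ↔ t ∈ cyc ∨ pvAFrom adj start path nbs t := by
  revert hs t
  induction path, nbs, cyc using pvDfsA.induct adj start with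
  | case1 path cyc =>
    intro hs t
    simp [pvDfsA, pvAFrom]
  | case2 path cyc nb rest h ih =>
    intro hs t
    rw [pvDfsA, if_pos h, ih hs t, PySem.Set.mem_add]
    obtain ⟨rfl, hlen⟩ := h
    unfold pvAFrom
    constructor
    · rintro ((hc | hcan) | hf)
      · exact Or.inl hc
      · exact Or.inr (Or.inl ⟨hlen, by simp, hcan⟩)
      · rcases hf with ⟨h1, h2, h3⟩ | ⟨nb', hnb', hrest⟩
        · exact Or.inr (Or.inl ⟨h1, by simp [h2], h3⟩)
        · exact Or.inr (Or.inr ⟨nb', by simp [hnb'], hrest⟩)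
    · rintro (hc | (⟨h1, _, h3⟩ | ⟨nb', hnb', hn1, hrest⟩))
      · exact Or.inl (Or.inl hc)
      · exact Or.inl (Or.inr h3)
      · rcases List.mem_cons.mp hnb' with rfl | hmem
        · exact absurd hs hn1
        · exact Or.inr (Or.inr ⟨nb', hmem, hn1, hrest⟩)
  | case3 path cyc nb rest h1 h2 ih =>
    intro hs t
    rw [pvDfsA, if_neg h1, if_pos h2, ih hs t]
    unfold pvAFrom
    constructor
    · rintro (hc | (⟨ha, hb, hcn⟩ | ⟨nb', hnb', hn1, hn2, hrest⟩))
      · exact Or.inl hc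
      · exact Or.inr (Or.inl ⟨ha, by simp [hb], hcn⟩)
      · exact Or.inr (Or.inr ⟨nb', by simp [hnb'], hn1, hn2, hrest⟩)
    · rintro (hc | (⟨ha, hb, hcn⟩ | ⟨nb', hnb', hn1, hn2, hrest⟩))
      · exact Or.inl hc
      · refine Or.inr (Or.inl ⟨ha, ?_, hcn⟩)
        rcases List.mem_cons.mp hb with rfl | hmem
        · exact absurd ⟨rfl, ha⟩ h1
        · exact hmem
      · rcases List.mem_cons.mp hnb' with rfl | hmem
        · rcases h2 with hm | hl
          · exact absurd hm hn1
          · exact absurd hn2 (by omega)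
        · exact Or.inr (Or.inr ⟨nb', hmem, hn1, hn2, hrest⟩)
  | case4 path cyc nb rest h1 h2 ih1 ih2 =>
    intro hs t
    push Not at h2
    obtain ⟨hnp, hlt⟩ := h2
    have hlt' : path.length < 6 := by omega
    rw [pvDfsA, if_neg h1, if_neg (by push Not; exact ⟨hnp, by omega⟩),
        ih2 hs t, ih1 (by simp [hs]) t]
    have hbr : pvAFrom adj start (path ++ [nb]) (adj.getD nb []) t ↔
        pvAFull adj start (path ++ [nb]) t := by
      have hl : pvLastS (path ++ [nb]) = nb := by simp [pvLastS]
      unfold pvAFrom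
      rw [show (adj.getD nb [] : List String) = adj.getD (pvLastS (path ++ [nb])) [] from by
        rw [hl]]
      exact pvAFull_unfold.symm
    rw [hbr]
    have hne : nb ≠ start := fun hh => hnp (hh ▸ hs)
    unfold pvAFrom
    constructor
    · rintro ((hc | hfull) | (⟨ha, hb, hcn⟩ | ⟨nb', hnb', hn1, hn2, hrest⟩))
      · exact Or.inl hc
      · exact Or.inr (Or.inr ⟨nb, by simp, hnp, hlt', hfull⟩)
      · exact Or.inr (Or.inl ⟨ha, by simp [hb], hcn⟩)
      · exact Or.inr (Or.inr ⟨nb', by simp [hnb'], hn1, hn2, hrest⟩)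
    · rintro (hc | (⟨ha, hb, hcn⟩ | ⟨nb', hnb', hn1, hn2, hrest⟩))
      · exact Or.inl (Or.inl hc)
      · refine Or.inr (Or.inl ⟨ha, ?_, hcn⟩)
        rcases List.mem_cons.mp hb with hh | hmem
        · exact absurd hh.symm hne
        · exact hmem
      · rcases List.mem_cons.mp hnb' with rfl | hmem
        · exact Or.inl (Or.inr hrest)
        · exact Or.inr (Or.inr ⟨nb', hmem, hn1, hn2, hrest⟩)

theorem pvDfsA_nodup (adj : PySem.Dict String (PySem.Set String)) (start : String)
    (path : List String) (nbs : List String) (cyc : PySem.Set (List String))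
    (h : cyc.Nodup) : (pvDfsA adj start path nbs cyc).Nodup := by
  revert h
  induction path, nbs, cyc using pvDfsA.induct adj start with
  | case1 path cyc => intro h; simpa [pvDfsA] using h
  | case2 path cyc nb rest h ih =>
    intro hn
    rw [pvDfsA, if_pos h]
    exact ih (PySem.Set.nodup_add _ _ hn)
  | case3 path cyc nb rest h1 h2 ih =>
    intro hn
    rw [pvDfsA, if_neg h1, if_pos h2]
    exact ih hn
  | case4 path cyc nb rest h1 h2 ih1 ih2 =>
    intro hn
    rw [pvDfsA, if_neg h1, if_neg h2]
    exact ih2 (ih1 hn)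

theorem pvAFold_mem (adj : PySem.Dict String (PySem.Set String)) (ks : List String)
    (cyc : PySem.Set (List String)) (t : List String) :
    t ∈ ks.foldl (fun cyc s => pvDfsA adj s [s] (adj.getD s []) cyc) cyc ↔
      t ∈ cyc ∨ ∃ s ∈ ks, pvAFull adj s [s] t := by
  induction ks generalizing cyc with
  | nil => simp
  | cons k ks ih =>
    simp only [List.foldl_cons, ih, List.mem_cons]
    rw [pvDfsA_mem adj k [k] (adj.getD k []) cyc (by simp) t]
    have hbr : pvAFrom adj k [k] (adj.getD k []) t ↔ pvAFull adj k [k] t := by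
      unfold pvAFrom
      rw [show (adj.getD k [] : List String) = adj.getD (pvLastS [k]) [] from by
        simp [pvLastS]]
      exact pvAFull_unfold.symm
    rw [hbr]
    constructor
    · rintro ((hc | hf) | ⟨s, hsk, hfull⟩)
      · exact Or.inl hc
      · exact Or.inr ⟨k, Or.inl rfl, hf⟩
      · exact Or.inr ⟨s, Or.inr hsk, hfull⟩
    · rintro (hc | ⟨s, rfl | hsk, hfull⟩)
      · exact Or.inl (Or.inl hc)
      · exact Or.inl (Or.inr hfull)
      · exact Or.inr ⟨s, hsk, hfull⟩

theorem pvAFold_nodup (adj : PySem.Dict String (PySem.Set String)) (ks : List String)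
    (cyc : PySem.Set (List String)) (h : cyc.Nodup) :
    (ks.foldl (fun cyc s => pvDfsA adj s [s] (adj.getD s []) cyc) cyc).Nodup := by
  induction ks generalizing cyc with
  | nil => exact h
  | cons k ks ih => exact ih _ (pvDfsA_nodup adj k [k] (adj.getD k []) cyc h)


-- ---------- B side ----------
theorem pvGetD_zero (p : List String) : PySem.List.pyGetD p 0 "" = pvHeadS p := by
  cases p <;> simp [PySem.List.pyGetD, PySem.List.pyGet?, PySem.List.pyIdx?, pvHeadS]

theorem pvGetD_neg_one (p : List String) : PySem.List.pyGetD p (-1) "" = pvLastS p := by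
  cases p with
  | nil => simp [PySem.List.pyGetD, PySem.List.pyGet?, PySem.List.pyIdx?, pvLastS]
  | cons a l =>
    simp only [PySem.List.pyGetD, PySem.List.pyGet?, PySem.List.pyIdx?, pvLastS]
    rw [List.getLast?_eq_getElem?]
    simp

-- the inner neighbor loop of pvBfsStep
theorem pvInner_fst (p : List String)
    (nbs : List String) (acc : List (List String) × PySem.Set (List String)) (q : List String) :
    q ∈ (nbs.foldl (fun acc2 nb =>
      if nb = PySem.List.pyGetD p 0 "" then
        if 1 < p.length then
          (acc2.1, PySem.Set.add acc2.2 (PySem.List.sorted p (fun x => x) false))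
        else acc2
      else if nb ∉ p ∧ p.length < 6 then (acc2.1 ++ [p ++ [nb]], acc2.2)
      else acc2) acc).1 ↔
    q ∈ acc.1 ∨ ∃ nb ∈ nbs, nb ≠ pvHeadS p ∧ nb ∉ p ∧ p.length < 6 ∧ q = p ++ [nb] := by
  induction nbs generalizing acc with
  | nil => simp
  | cons nb nbs ih =>
    rw [List.foldl_cons, ih]
    rw [pvGetD_zero]
    by_cases h1 : nb = pvHeadS p
    · rw [if_pos h1]
      by_cases h2 : 1 < p.length
      · rw [if_pos h2]
        simp only [List.mem_cons]
        constructor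
        · rintro (hq | ⟨nb', hnb', hx⟩)
          · exact Or.inl hq
          · exact Or.inr ⟨nb', Or.inr hnb', hx⟩
        · rintro (hq | ⟨nb', rfl | hnb', hx1, hx⟩)
          · exact Or.inl hq
          · exact absurd h1 hx1
          · exact Or.inr ⟨nb', hnb', hx1, hx⟩
      · rw [if_neg h2]
        simp only [List.mem_cons]
        constructor
        · rintro (hq | ⟨nb', hnb', hx⟩)
          · exact Or.inl hq
          · exact Or.inr ⟨nb', Or.inr hnb', hx⟩
        · rintro (hq | ⟨nb', rfl | hnb', hx1, hx⟩)
          · exact Or.inl hq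
          · exact absurd h1 hx1
          · exact Or.inr ⟨nb', hnb', hx1, hx⟩
    · rw [if_neg h1]
      by_cases h2 : nb ∉ p ∧ p.length < 6
      · rw [if_pos h2]
        simp only [List.mem_append, List.mem_cons, List.not_mem_nil, or_false]
        constructor
        · rintro ((hq | rfl) | ⟨nb', hnb', hx⟩)
          · exact Or.inl hq
          · exact Or.inr ⟨nb, Or.inl rfl, h1, h2.1, h2.2, rfl⟩
          · exact Or.inr ⟨nb', Or.inr hnb', hx⟩
        · rintro (hq | ⟨nb', rfl | hnb', hx1, hx2, hx3, rfl⟩)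
          · exact Or.inl (Or.inl hq)
          · exact Or.inl (Or.inr rfl)
          · exact Or.inr ⟨nb', hnb', hx1, hx2, hx3, rfl⟩
      · rw [if_neg h2]
        simp only [List.mem_cons]
        constructor
        · rintro (hq | ⟨nb', hnb', hx⟩)
          · exact Or.inl hq
          · exact Or.inr ⟨nb', Or.inr hnb', hx⟩
        · rintro (hq | ⟨nb', rfl | hnb', hx1, hx2, hx3, hx4⟩)
          · exact Or.inl hq
          · exact absurd ⟨hx2, hx3⟩ h2
          · exact Or.inr ⟨nb', hnb', hx1, hx2, hx3, hx4⟩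

theorem pvInner_snd (p : List String)
    (nbs : List String) (acc : List (List String) × PySem.Set (List String)) (t : List String) :
    t ∈ (nbs.foldl (fun acc2 nb =>
      if nb = PySem.List.pyGetD p 0 "" then
        if 1 < p.length then
          (acc2.1, PySem.Set.add acc2.2 (PySem.List.sorted p (fun x => x) false))
        else acc2
      else if nb ∉ p ∧ p.length < 6 then (acc2.1 ++ [p ++ [nb]], acc2.2)
      else acc2) acc).2 ↔
    t ∈ acc.2 ∨ (pvHeadS p ∈ nbs ∧ 1 < p.length ∧ t = pvCanon p) := by
  induction nbs generalizing acc with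
  | nil => simp
  | cons nb nbs ih =>
    rw [List.foldl_cons, ih]
    rw [pvGetD_zero]
    by_cases h1 : nb = pvHeadS p
    · rw [if_pos h1]
      by_cases h2 : 1 < p.length
      · rw [if_pos h2]
        simp only [PySem.Set.mem_add, List.mem_cons]
        constructor
        · rintro ((ht | hcn) | ⟨hm, hl, hcn⟩)
          · exact Or.inl ht
          · exact Or.inr ⟨Or.inl h1.symm, h2, hcn⟩
          · exact Or.inr ⟨Or.inr hm, hl, hcn⟩
        · rintro (ht | ⟨hm, hl, hcn⟩)
          · exact Or.inl (Or.inl ht)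
          · exact Or.inl (Or.inr hcn)
      · rw [if_neg h2]
        simp only [List.mem_cons]
        constructor
        · rintro (ht | ⟨hm, hl, hcn⟩)
          · exact Or.inl ht
          · exact Or.inr ⟨Or.inr hm, hl, hcn⟩
        · rintro (ht | ⟨hm | hm, hl, hcn⟩)
          · exact Or.inl ht
          · exact absurd hl h2
          · exact Or.inr ⟨hm, hl, hcn⟩
    · rw [if_neg h1]
      by_cases h2 : nb ∉ p ∧ p.length < 6
      · rw [if_pos h2]
        simp only [List.mem_cons]
        constructor
        · rintro (ht | ⟨hm, hl, hcn⟩)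
          · exact Or.inl ht
          · exact Or.inr ⟨Or.inr hm, hl, hcn⟩
        · rintro (ht | ⟨hm | hm, hl, hcn⟩)
          · exact Or.inl ht
          · exact absurd hm.symm h1
          · exact Or.inr ⟨hm, hl, hcn⟩
      · rw [if_neg h2]
        simp only [List.mem_cons]
        constructor
        · rintro (ht | ⟨hm, hl, hcn⟩)
          · exact Or.inl ht
          · exact Or.inr ⟨Or.inr hm, hl, hcn⟩
        · rintro (ht | ⟨hm | hm, hl, hcn⟩)
          · exact Or.inl ht
          · exact absurd hm.symm h1
          · exact Or.inr ⟨hm, hl, hcn⟩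


theorem pvExtN_snoc {adj : PySem.Dict String (PySem.Set String)} {n : Nat} {p q : List String}
    {nb : String} (h : pvExtN adj n p q) (hnb : nb ∈ adj.getD (pvLastS q) [])
    (hm : nb ∉ q) (hl : q.length < 6) : pvExtN adj (n + 1) p (q ++ [nb]) := by
  induction h with
  | refl => exact pvExtN.step hnb hm hl (pvExtN.refl _)
  | step a b c _ ih => exact pvExtN.step a b c (ih hnb hm hl)

theorem pvExtN_succ {adj : PySem.Dict String (PySem.Set String)} {n : Nat} {p q : List String}
    (h : pvExtN adj (n + 1) p q) :
    ∃ r nb, pvExtN adj n p r ∧ nb ∈ adj.getD (pvLastS r) [] ∧ nb ∉ r ∧ r.length < 6 ∧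
      q = r ++ [nb] := by
  induction n generalizing p with
  | zero =>
    cases h with
    | step hnb hm hl hrest => exact ⟨p, _, pvExtN.refl p, hnb, hm, hl, pvExtN_zero hrest⟩
  | succ m ih =>
    cases h with
    | step hnb hm hl hrest =>
      obtain ⟨r, nb', h1, h2, h3, h4, h5⟩ := ih hrest
      exact ⟨r, nb', pvExtN.step hnb hm hl h1, h2, h3, h4, h5⟩

-- the outer loop of pvBfsStep
theorem pvStep_fst (adj : PySem.Dict String (PySem.Set String)) (level : List (List String))
    (acc : List (List String) × PySem.Set (List String)) (q : List String) :
    q ∈ (level.foldl (fun acc p =>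
      (adj.getD (PySem.List.pyGetD p (-1) "") []).foldl (fun acc2 nb =>
        if nb = PySem.List.pyGetD p 0 "" then
          if 1 < p.length then
            (acc2.1, PySem.Set.add acc2.2 (PySem.List.sorted p (fun x => x) false))
          else acc2
        else if nb ∉ p ∧ p.length < 6 then (acc2.1 ++ [p ++ [nb]], acc2.2)
        else acc2) acc) acc).1 ↔
    q ∈ acc.1 ∨ ∃ p ∈ level, ∃ nb ∈ adj.getD (pvLastS p) [],
      nb ≠ pvHeadS p ∧ nb ∉ p ∧ p.length < 6 ∧ q = p ++ [nb] := by
  induction level generalizing acc with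
  | nil => simp
  | cons p level ih =>
    rw [List.foldl_cons, ih, pvInner_fst, pvGetD_neg_one]
    simp only [List.mem_cons]
    constructor
    · rintro ((hq | ⟨nb, hnb, hx⟩) | ⟨p', hp', hr⟩)
      · exact Or.inl hq
      · exact Or.inr ⟨p, Or.inl rfl, nb, hnb, hx⟩
      · exact Or.inr ⟨p', Or.inr hp', hr⟩
    · rintro (hq | ⟨p', rfl | hp', hr⟩)
      · exact Or.inl (Or.inl hq)
      · exact Or.inl (Or.inr hr)
      · exact Or.inr ⟨p', hp', hr⟩

theorem pvStep_snd (adj : PySem.Dict String (PySem.Set String)) (level : List (List String))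
    (acc : List (List String) × PySem.Set (List String)) (t : List String) :
    t ∈ (level.foldl (fun acc p =>
      (adj.getD (PySem.List.pyGetD p (-1) "") []).foldl (fun acc2 nb =>
        if nb = PySem.List.pyGetD p 0 "" then
          if 1 < p.length then
            (acc2.1, PySem.Set.add acc2.2 (PySem.List.sorted p (fun x => x) false))
          else acc2
        else if nb ∉ p ∧ p.length < 6 then (acc2.1 ++ [p ++ [nb]], acc2.2)
        else acc2) acc) acc).2 ↔
    t ∈ acc.2 ∨ ∃ p ∈ level,
      pvHeadS p ∈ adj.getD (pvLastS p) [] ∧ 1 < p.length ∧ t = pvCanon p := by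
  induction level generalizing acc with
  | nil => simp
  | cons p level ih =>
    rw [List.foldl_cons, ih, pvInner_snd, pvGetD_neg_one]
    simp only [List.mem_cons]
    constructor
    · rintro ((ht | hc) | ⟨p', hp', hr⟩)
      · exact Or.inl ht
      · exact Or.inr ⟨p, Or.inl rfl, hc⟩
      · exact Or.inr ⟨p', Or.inr hp', hr⟩
    · rintro (ht | ⟨p', rfl | hp', hr⟩)
      · exact Or.inl (Or.inl ht)
      · exact Or.inl (Or.inr hr)
      · exact Or.inr ⟨p', hp', hr⟩

theorem pvInner_nodup (p : List String) (nbs : List String)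
    (acc : List (List String) × PySem.Set (List String)) (h : acc.2.Nodup) :
    (nbs.foldl (fun acc2 nb =>
      if nb = PySem.List.pyGetD p 0 "" then
        if 1 < p.length then
          (acc2.1, PySem.Set.add acc2.2 (PySem.List.sorted p (fun x => x) false))
        else acc2
      else if nb ∉ p ∧ p.length < 6 then (acc2.1 ++ [p ++ [nb]], acc2.2)
      else acc2) acc).2.Nodup := by
  induction nbs generalizing acc with
  | nil => exact h
  | cons nb nbs ih =>
    rw [List.foldl_cons]
    by_cases h1 : nb = PySem.List.pyGetD p 0 ""
    · rw [if_pos h1]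
      by_cases h2 : 1 < p.length
      · rw [if_pos h2]; exact ih _ (PySem.Set.nodup_add _ _ h)
      · rw [if_neg h2]; exact ih _ h
    · rw [if_neg h1]
      by_cases h2 : nb ∉ p ∧ p.length < 6
      · rw [if_pos h2]; exact ih _ h
      · rw [if_neg h2]; exact ih _ h

theorem pvStepB_nodup (adj : PySem.Dict String (PySem.Set String)) (level : List (List String))
    (acc : List (List String) × PySem.Set (List String)) (h : acc.2.Nodup) :
    (level.foldl (fun acc p =>
      (adj.getD (PySem.List.pyGetD p (-1) "") []).foldl (fun acc2 nb =>
        if nb = PySem.List.pyGetD p 0 "" then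
          if 1 < p.length then
            (acc2.1, PySem.Set.add acc2.2 (PySem.List.sorted p (fun x => x) false))
          else acc2
        else if nb ∉ p ∧ p.length < 6 then (acc2.1 ++ [p ++ [nb]], acc2.2)
        else acc2) acc) acc).2.Nodup := by
  induction level generalizing acc with
  | nil => exact h
  | cons p level ih => exact ih _ (pvInner_nodup p _ acc h)

-- the BFS invariant: after k rounds the level holds exactly the k-step extensions and the
-- cycle set holds exactly the closures of the first k levels
def pvInv (adj : PySem.Dict String (PySem.Set String)) (k : Nat)
    (st : List (List String) × PySem.Set (List String)) : Prop :=
  (∀ q, q ∈ st.1 ↔ ∃ s ∈ adj.keys, pvExtN adj k [s] q) ∧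
  (∀ t, t ∈ st.2 ↔ ∃ s ∈ adj.keys, ∃ j, j < k ∧ ∃ q, pvExtN adj j [s] q ∧
      1 < q.length ∧ s ∈ adj.getD (pvLastS q) [] ∧ t = pvCanon q)

theorem pvInv_init (adj : PySem.Dict String (PySem.Set String)) :
    pvInv adj 0 (adj.keys.map (fun s => [s]), (PySem.Set.empty : PySem.Set (List String))) := by
  constructor
  · intro q
    simp only [List.mem_map]
    constructor
    · rintro ⟨s, hs, rfl⟩; exact ⟨s, hs, pvExtN.refl _⟩
    · rintro ⟨s, hs, hext⟩; exact ⟨s, hs, (pvExtN_zero hext).symm⟩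
  · intro t
    simp [PySem.Set.empty]

theorem pvInv_step (adj : PySem.Dict String (PySem.Set String)) (k : Nat)
    (st : List (List String) × PySem.Set (List String)) (h : pvInv adj k st) :
    pvInv adj (k + 1) (pvBfsStep adj st) := by
  obtain ⟨h1, h2⟩ := h
  constructor
  · intro q
    unfold pvBfsStep
    rw [pvStep_fst]
    simp only [List.not_mem_nil, false_or]
    constructor
    · rintro ⟨p, hp, nb, hnb, hne, hnm, hlt, rfl⟩
      obtain ⟨s, hs, hext⟩ := (h1 p).mp hp
      exact ⟨s, hs, pvExtN_snoc hext hnb hnm hlt⟩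
    · rintro ⟨s, hs, hext⟩
      obtain ⟨r, nb, hr, hnb, hnm, hlt, rfl⟩ := pvExtN_succ hext
      have hsr : s ∈ r := pvExtN_mem hr s (by simp)
      have hhead : pvHeadS r = s := by
        rw [pvExtN_head (by simp) hr]; rfl
      exact ⟨r, (h1 r).mpr ⟨s, hs, hr⟩, nb, hnb,
        fun hh => hnm (hh ▸ hhead ▸ hsr), hnm, hlt, rfl⟩
  · intro t
    unfold pvBfsStep
    rw [pvStep_snd]
    constructor
    · rintro (ht | ⟨p, hp, hc1, hc2, hc3⟩)
      · obtain ⟨s, hs, j, hj, hrest⟩ := (h2 t).mp ht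
        exact ⟨s, hs, j, by omega, hrest⟩
      · obtain ⟨s, hs, hext⟩ := (h1 p).mp hp
        have hhead : pvHeadS p = s := by
          rw [pvExtN_head (by simp) hext]; rfl
        exact ⟨s, hs, k, by omega, p, hext, hc2, hhead ▸ hc1, hc3⟩
    · rintro ⟨s, hs, j, hj, q', hext, hl, hcl, rfl⟩
      by_cases hjk : j < k
      · exact Or.inl ((h2 _).mpr ⟨s, hs, j, hjk, q', hext, hl, hcl, rfl⟩)
      · have : j = k := by omega
        subst this
        have hhead : pvHeadS q' = s := by
          rw [pvExtN_head (by simp) hext]; rfl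
        exact Or.inr ⟨q', (h1 q').mpr ⟨s, hs, hext⟩, hhead ▸ hcl, hl, rfl⟩

-- A's full cycle set and B's coincide elementwise
theorem pvMain (edges : List (List (String × String))) :
    compute_cycle_count_py edges = compute_cycle_count_py_alt edges := by
  unfold compute_cycle_count_py compute_cycle_count_py_alt
  have hrange : PySem.List.pyRange 0 6 1 = [0, 1, 2, 3, 4, 5] := by decide
  rw [hrange]
  set adj := pvBuildAdj edges with hadj
  simp only [List.foldl_cons, List.foldl_nil]
  set st0 : List (List String) × PySem.Set (List String) :=
    (adj.keys.map (fun s => [s]), PySem.Set.empty) with hst0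
  have h6 : pvInv adj 6 (pvBfsStep adj (pvBfsStep adj (pvBfsStep adj (pvBfsStep adj
      (pvBfsStep adj (pvBfsStep adj st0)))))) :=
    pvInv_step _ _ _ (pvInv_step _ _ _ (pvInv_step _ _ _ (pvInv_step _ _ _
      (pvInv_step _ _ _ (pvInv_step _ _ _ (pvInv_init adj))))))
  set LB := (pvBfsStep adj (pvBfsStep adj (pvBfsStep adj (pvBfsStep adj
      (pvBfsStep adj (pvBfsStep adj st0)))))).2 with hLB
  set LA := adj.keys.foldl (fun cyc s => pvDfsA adj s [s] (adj.getD s []) cyc)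
      (PySem.Set.empty : PySem.Set (List String)) with hLA
  have hmem : ∀ t, t ∈ LA ↔ t ∈ LB := by
    intro t
    rw [hLA, pvAFold_mem, h6.2]
    simp only [PySem.Set.empty, List.not_mem_nil, false_or]
    constructor
    · rintro ⟨s, hs, n, q, hext, hl, hcl, rfl⟩
      have hn6 : n < 6 := by
        rcases pvExtN_le6 hext with h0 | hq6
        · omega
        · have := pvExtN_len hext
          simp at this
          omega
      exact ⟨s, hs, n, hn6, q, hext, hl, hcl, rfl⟩
    · rintro ⟨s, hs, j, hj, q, hext, hl, hcl, rfl⟩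
      exact ⟨s, hs, j, q, hext, hl, hcl, rfl⟩
  have hna : LA.Nodup := pvAFold_nodup adj adj.keys PySem.Set.empty (by simp [PySem.Set.empty])
  have hnb : LB.Nodup := by
    rw [hLB]
    unfold pvBfsStep
    apply pvStepB_nodup; apply pvStepB_nodup; apply pvStepB_nodup
    apply pvStepB_nodup; apply pvStepB_nodup; apply pvStepB_nodup
    simp [hst0, PySem.Set.empty]
  have hlen : LA.length = LB.length := by
    have hfs : LA.toFinset = LB.toFinset := by
      apply Finset.ext
      intro a
      simp only [List.mem_toFinset]
      exact hmem a
    rw [← List.toFinset_card_of_nodup hna, ← List.toFinset_card_of_nodup hnb, hfs]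
  simp [PySem.Set.len, hlen]

-- ===== VERDICT (by name: the statement is the Claim_ definition above) =====
theorem compute_cycle_count_py_spec : Claim_equal_compute_cycle_count_py := by
  intro edges _
  unfold Spec_compute_cycle_count_py
  exact pvMain edges
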